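-- pv_equiv track=rewrite | github.com/blmuffley/Bearing | src/bearing/assessment/dimensions/accuracy.py | _is_generic_name
-- ===== SOURCE A (Python) =====
-- def _is_generic_name(name: str) -> bool:
--     """Check if a CI name is generic or a placeholder."""
--     if not name:
--         return True
--     lower = name.lower().strip()
--     generic_patterns = [
--         "unknown", "new ci", "test", "temp", "placeholder",
--         "unnamed", "default", "n/a", "none", "tbd",
--     ]
--     return any(lower.startswith(p) or lower == p for p in generic_patterns)
-- ===== SOURCE B (Python) =====
-- _PATTERNS = [
--     "unknown", "new ci", "test", "temp", "placeholder",
--     "unnamed", "default", "n/a", "none", "tbd",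
-- ]
--
-- # Flat trie (prefix automaton) built once: node = [terminal, {char: node_index}].
-- _NODES = [[False, {}]]
-- for _p in _PATTERNS:
--     _i = 0
--     for _c in _p:
--         _edges = _NODES[_i][1]
--         if _c not in _edges:
--             _edges[_c] = len(_NODES)
--             _NODES.append([False, {}])
--         _i = _edges[_c]
--     _NODES[_i][0] = True
--
--
-- def _is_generic_name(name: str) -> bool:
--     if not name:
--         return True
--     i = 0
--     for c in name.lower().strip():
--         node = _NODES[i]
--         if node[0]:
--             return True
--         i = node[1].get(c, -1)
--         if i < 0:
--             return False
--     return _NODES[i][0]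
-- ===== Notes on version B (the rewrite author's own statement) =====
-- stated objective: alternative
-- what changed: Replaces the per-pattern startswith/equality scan with a trie (prefix automaton) built once from the ten patterns and walked character by character over the lowered stripped name, accepting as soon as a terminal node is reached; the redundant `lower == p` clause is subsumed by the prefix acceptance.
import Mathlib
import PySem

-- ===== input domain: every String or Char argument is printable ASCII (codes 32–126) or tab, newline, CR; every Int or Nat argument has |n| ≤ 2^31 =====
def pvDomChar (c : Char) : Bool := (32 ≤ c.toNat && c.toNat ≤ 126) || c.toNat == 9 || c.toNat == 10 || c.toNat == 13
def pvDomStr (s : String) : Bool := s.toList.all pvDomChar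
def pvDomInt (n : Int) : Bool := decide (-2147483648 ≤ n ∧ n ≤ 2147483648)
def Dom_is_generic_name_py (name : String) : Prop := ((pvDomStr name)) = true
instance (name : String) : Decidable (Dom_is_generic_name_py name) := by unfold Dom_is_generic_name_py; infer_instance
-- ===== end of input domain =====

-- ===== PORT A =====
-- B replaces A's per-pattern startswith/equality scan by a trie (prefix automaton)
-- built once and walked over the string's characters; return values proven equal.
def genericPatterns : List String :=
  ["unknown", "new ci", "test", "temp", "placeholder",
   "unnamed", "default", "n/a", "none", "tbd"]

def is_generic_name_py (name : String) : Bool :=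
  if name == "" then true
  else
    let lower := PySem.Str.strip (PySem.Str.lower name)
    genericPatterns.any (fun p => PySem.Str.startswith lower p || lower == p)

-- ===== PORT B =====
-- trie node = (terminal flag, edge assoc list char → node index); built by inserting
-- each pattern, exactly as Source B's module-level loop does.
def triePatterns : List String :=
  ["unknown", "new ci", "test", "temp", "placeholder",
   "unnamed", "default", "n/a", "none", "tbd"]

def trieStep (st : List (Bool × List (Char × Nat)) × Nat) (c : Char) :
    List (Bool × List (Char × Nat)) × Nat :=
  let ns := st.1
  let i := st.2
  let nd := ns.getD i (false, [])
  match nd.2.find? (fun e => e.1 == c) with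
  | some e => (ns, e.2)
  | none =>
      let j := ns.length
      (ns.set i (nd.1, nd.2 ++ [(c, j)]) ++ [(false, [])], j)

def trieAdd (ns : List (Bool × List (Char × Nat))) (p : String) :
    List (Bool × List (Char × Nat)) :=
  let st := p.toList.foldl trieStep (ns, 0)
  let nd := st.1.getD st.2 (false, [])
  st.1.set st.2 (true, nd.2)

def trieNodes : List (Bool × List (Char × Nat)) :=
  triePatterns.foldl trieAdd [(false, [])]

-- the character loop of Source B: early-accept on a terminal node, follow the edge, reject if absent
def trieRun : List Char → Nat → Bool
  | [], i => (trieNodes.getD i (false, [])).1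
  | c :: cs, i =>
    let nd := trieNodes.getD i (false, [])
    if nd.1 then true
    else
      match nd.2.find? (fun e => e.1 == c) with
      | some e => trieRun cs e.2
      | none => false

def is_generic_name_py_alt (name : String) : Bool :=
  if name == "" then true
  else trieRun (PySem.Str.strip (PySem.Str.lower name)).toList 0

-- ===== PRECONDITION & SPEC =====
def Spec_is_generic_name_py (name : String) (out : Bool) : Prop := out = is_generic_name_py_alt name
instance (name : String) (out : Bool) : Decidable (Spec_is_generic_name_py name out) := by unfold Spec_is_generic_name_py; infer_instance

-- ===== CLAIM (what is proved, stated in full; the proofs are below) =====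
def Claim_equal_is_generic_name_py : Prop := ∀ (name : String), Dom_is_generic_name_py name → Spec_is_generic_name_py name (is_generic_name_py name)

-- ===== LEMMAS AND PROOFS =====

-- the set of pattern suffixes readable from trie node i (fuel-bounded recursion)
def triePaths : Nat → Nat → List (List Char)
  | 0, _ => []
  | fuel+1, i =>
    let nd := trieNodes.getD i (false, [])
    (if nd.1 then [([] : List Char)] else []) ++
      nd.2.flatMap (fun e => (triePaths fuel e.2).map (fun r => e.1 :: r))

-- well-formedness of the concrete table: distinct edge labels, edges strictly increasing and in range
set_option maxRecDepth 20000 in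
theorem trieWf : ∀ i ∈ List.range trieNodes.length,
    ((trieNodes.getD i (false, [])).2.map Prod.fst).Nodup ∧
    ∀ e ∈ (trieNodes.getD i (false, [])).2, i < e.2 ∧ e.2 < trieNodes.length := by
  decide

theorem trieWf' (i : Nat) (hi : i < trieNodes.length) :
    ((trieNodes.getD i (false, [])).2.map Prod.fst).Nodup ∧
    ∀ e ∈ (trieNodes.getD i (false, [])).2, i < e.2 ∧ e.2 < trieNodes.length :=
  trieWf i (List.mem_range.mpr hi)

theorem any_and_left (b : Bool) (f : List Char → Bool) (l : List (List Char)) :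
    l.any (fun x => b && f x) = (b && l.any f) := by
  cases b <;> simp

theorem any_congr_mem {α : Type} (l : List α) (f g : α → Bool)
    (h : ∀ x ∈ l, f x = g x) : l.any f = l.any g := by
  induction l with
  | nil => rfl
  | cons a t ih =>
      simp only [List.any_cons, h a (List.mem_cons_self ..),
        ih (fun x hx => h x (List.mem_cons_of_mem _ hx))]

theorem any_assoc_find (c : Char) (f : Char × Nat → Bool) :
    ∀ (l : List (Char × Nat)), (l.map Prod.fst).Nodup →
      l.any (fun e => (e.1 == c) && f e) =
        (match l.find? (fun e => e.1 == c) with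
         | some e => f e
         | none => false) := by
  intro l
  induction l with
  | nil => intro _; rfl
  | cons a t ih =>
      intro hnd
      have hnd' := hnd
      simp only [List.map_cons, List.nodup_cons] at hnd'
      cases hac : (a.1 == c) with
      | false =>
          simp only [List.any_cons, hac, Bool.false_and, Bool.false_or,
            List.find?_cons, ih hnd'.2]
      | true =>
          have hc : a.1 = c := beq_iff_eq.mp hac
          have htail : t.any (fun e => (e.1 == c) && f e) = false := by
            rw [List.any_eq_false]
            intro e he
            have : e.1 ≠ c := by
              intro h
              exact hnd'.1 (by rw [hc, ← h]; exact List.mem_map_of_mem he)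
            simp [this]
          simp only [List.any_cons, hac, Bool.true_and, List.find?_cons, htail,
            Bool.or_false]

theorem run_eq_paths : ∀ (cs : List Char) (i fuel : Nat),
    i < trieNodes.length → trieNodes.length - i ≤ fuel →
    trieRun cs i = (triePaths fuel i).any (fun p => p.isPrefixOf cs) := by
  intro cs
  induction cs with
  | nil =>
      intro i fuel hi hfuel
      obtain ⟨f, rfl⟩ : ∃ f, fuel = f + 1 := by
        cases fuel with
        | zero => omega
        | succ f => exact ⟨f, rfl⟩
      show (trieNodes.getD i (false, [])).1 = _
      simp only [triePaths]
      cases ht : (trieNodes.getD i (false, [])).1 with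
      | true => simp
      | false =>
          simp only [Bool.false_eq_true, if_false, List.nil_append, List.any_flatMap,
            List.any_map, Function.comp_def]
          symm
          rw [List.any_eq_false]
          intro e _
          simp [List.isPrefixOf]
  | cons c cs ih =>
      intro i fuel hi hfuel
      obtain ⟨f, rfl⟩ : ∃ f, fuel = f + 1 := by
        cases fuel with
        | zero => omega
        | succ f => exact ⟨f, rfl⟩
      show (let nd := trieNodes.getD i (false, []);
            if nd.1 then true
            else match nd.2.find? (fun e => e.1 == c) with
                 | some e => trieRun cs e.2
                 | none => false) = _
      simp only [triePaths]
      cases ht : (trieNodes.getD i (false, [])).1 with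
      | true => simp
      | false =>
          simp only [Bool.false_eq_true, if_false, List.nil_append, List.any_flatMap,
            List.any_map, Function.comp_def]
          have hstep : ∀ e ∈ (trieNodes.getD i (false, [])).2,
              ((triePaths f e.2).any (fun r => (e.1 :: r).isPrefixOf (c :: cs)))
                = ((e.1 == c) && trieRun cs e.2) := by
            intro e he
            have hwf := (trieWf' i hi).2 e he
            have hrun := ih e.2 f hwf.2 (by omega)
            have : ∀ r : List Char, (e.1 :: r).isPrefixOf (c :: cs)
                = ((e.1 == c) && r.isPrefixOf cs) := fun r => rfl
            simp only [this, any_and_left, ← hrun]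
          rw [any_congr_mem _ _ _ hstep,
            any_assoc_find c (fun e => trieRun cs e.2) _ (trieWf' i hi).1]

set_option maxRecDepth 40000 in
theorem paths_root_any (cs : List Char) :
    (triePaths trieNodes.length 0).any (fun p => p.isPrefixOf cs)
      = (genericPatterns.map String.toList).any (fun p => p.isPrefixOf cs) := by
  have h1 : ∀ x ∈ triePaths trieNodes.length 0, x ∈ genericPatterns.map String.toList := by
    decide
  have h2 : ∀ x ∈ genericPatterns.map String.toList, x ∈ triePaths trieNodes.length 0 := by
    decide
  rw [Bool.eq_iff_iff, List.any_eq_true, List.any_eq_true]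
  exact ⟨fun ⟨x, hx, hp⟩ => ⟨x, h1 x hx, hp⟩, fun ⟨x, hx, hp⟩ => ⟨x, h2 x hx, hp⟩⟩

theorem or_eq_redundant (l p : String) :
    (PySem.Str.startswith l p || l == p) = PySem.Str.startswith l p := by
  cases hlp : (l == p) with
  | false => simp
  | true =>
      have hl : l = p := beq_iff_eq.mp hlp
      subst hl
      have hsw : PySem.Chars.startswith l.toList l.toList = true :=
        (PySem.Chars.startswith_iff _ _).mpr (List.prefix_refl _)
      simp [hsw]

theorem sw_eq_isPrefixOf (l p : String) :
    PySem.Str.startswith l p = p.toList.isPrefixOf l.toList := by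
  rw [Bool.eq_iff_iff, PySem.Str.startswith_eq, PySem.Chars.startswith_iff,
    List.isPrefixOf_iff_prefix]

set_option maxRecDepth 20000 in
theorem trieLenPos : 0 < trieNodes.length := by decide

theorem main_eq (l : String) :
    genericPatterns.any (fun p => PySem.Str.startswith l p || l == p)
      = trieRun l.toList 0 := by
  have h0 : 0 < trieNodes.length := by
    have := trieLenPos
    omega
  rw [run_eq_paths l.toList 0 trieNodes.length h0 (by omega), paths_root_any,
    List.any_map]
  simp only [or_eq_redundant]
  simp only [sw_eq_isPrefixOf, Function.comp_def]

-- ===== VERDICT (by name: the statement is the Claim_ definition above) =====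
theorem is_generic_name_py_spec : Claim_equal_is_generic_name_py := by
  intro name _
  show is_generic_name_py name = is_generic_name_py_alt name
  unfold is_generic_name_py is_generic_name_py_alt
  by_cases h : (name == "") = true
  · rw [if_pos h, if_pos h]
  · rw [if_neg h, if_neg h]; exact main_eq _
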